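-- pv_equiv track=rewrite | github.com/Platypus96/SmartPDF | src/round_1a.py | enforce_heading_order
-- ===== SOURCE A (Python) =====
-- def enforce_heading_order(outline):
--     """Ensure H2 does not appear before H1, H3 not before H2"""
--     has_seen = {"H1": False, "H2": False}
--     corrected = []
--
--     for item in outline:
--         level = item["level"]
--
--         if level == "H2" and not has_seen["H1"]:
--             # Downgrade to H1
--             item["level"] = "H1"
--         elif level == "H3" and not has_seen["H2"]:
--             if has_seen["H1"]:
--                 item["level"] = "H2"
--             else:
--                 item["level"] = "H1"
--
--         has_seen[item["level"]] = True
--         corrected.append(item)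
--
--     return corrected
-- ===== SOURCE B (Python) =====
-- def enforce_heading_order(outline):
--     """Ensure H2 does not appear before H1, H3 not before H2.
--
--     Running-maximum clamp: `established` is the deepest heading level reached
--     so far; each known level is clamped to established + 1.
--     Mutates the item dicts in place, like the original.
--     """
--     levels = {"H1": 1, "H2": 2, "H3": 3}
--     names = ("H1", "H2", "H3")
--     established = 0
--     result = []
--     for item in outline:
--         n = levels.get(item["level"])
--         if n is not None:
--             allowed = min(n, established + 1)
--             item["level"] = names[allowed - 1]
--             established = max(established, allowed)
--         result.append(item)
--     return result
-- ===== Notes on version B (the rewrite author's own statement) =====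
-- stated objective: simpler
-- what changed: Replaces the two-boolean has_seen state machine and its if/elif cascade by a single running-maximum integer `established`, clamping each known level to min(level, established+1) via a numeric map; unknown levels are skipped.
import Mathlib
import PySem

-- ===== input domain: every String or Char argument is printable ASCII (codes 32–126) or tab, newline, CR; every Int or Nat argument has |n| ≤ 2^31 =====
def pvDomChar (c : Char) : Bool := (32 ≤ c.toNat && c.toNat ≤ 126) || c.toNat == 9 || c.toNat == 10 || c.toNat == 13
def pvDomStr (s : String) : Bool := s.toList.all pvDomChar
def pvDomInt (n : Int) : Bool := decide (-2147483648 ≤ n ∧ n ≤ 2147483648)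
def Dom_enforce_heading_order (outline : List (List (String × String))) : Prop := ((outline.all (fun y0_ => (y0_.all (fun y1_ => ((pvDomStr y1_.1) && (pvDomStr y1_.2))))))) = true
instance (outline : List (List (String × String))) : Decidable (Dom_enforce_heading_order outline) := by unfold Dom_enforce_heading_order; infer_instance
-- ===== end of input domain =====

-- B replaces A's two-boolean has_seen state machine by a single running-maximum
-- integer clamp over a numeric level map (same O(n) cost, simpler state).
-- Both Pythons mutate the item dicts in place; the equivalence proved is about the return value.


-- ===== PORT A =====
-- one loop iteration of A: mutate item['level'] per the has_seen booleans, mark seen, append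
def ehoStep (st : PySem.Dict String Bool × List (List (String × String)))
    (item : List (String × String)) :
    PySem.Dict String Bool × List (List (String × String)) :=
  let hs := st.1
  let d : PySem.Dict String String := PySem.Dict.mk item
  let level := (d.get? "level").getD ""   -- item["level"]; KeyError (none) excluded by Pre_
  let d :=
    if level == "H2" && !(hs.getD "H1" false) then d.insert "level" "H1"
    else if level == "H3" && !(hs.getD "H2" false) then
      (if hs.getD "H1" false then d.insert "level" "H2" else d.insert "level" "H1")
    else d
  let hs := hs.insert ((d.get? "level").getD "") true
  (hs, st.2 ++ [d.items])

def enforce_heading_order (outline : List (List (String × String))) : List (List (String × String)) :=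
  (outline.foldl ehoStep (((PySem.Dict.empty).insert "H1" false).insert "H2" false, [])).2

-- ===== PORT B =====
-- one loop iteration of B: clamp a known level to established+1, append
def ehoAltStep (st : Int × List (List (String × String)))
    (item : List (String × String)) :
    Int × List (List (String × String)) :=
  let d : PySem.Dict String String := PySem.Dict.mk item
  match (PySem.Dict.mk [("H1", (1 : Int)), ("H2", 2), ("H3", 3)]).get? ((d.get? "level").getD "") with
  | none => (st.1, st.2 ++ [d.items])
  | some n =>
    let allowed := min n (st.1 + 1)
    let d := d.insert "level" (PySem.List.pyGetD ["H1", "H2", "H3"] (allowed - 1) "")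
    (max st.1 allowed, st.2 ++ [d.items])

def enforce_heading_order_alt (outline : List (List (String × String))) : List (List (String × String)) :=
  (outline.foldl ehoAltStep (0, [])).2

-- ===== PRECONDITION & SPEC =====
-- Pre_ excludes items whose association list lacks a "level" key (Python A raises KeyError there)
-- and items with duplicate keys, which do not represent any Python dict (the encoding's first-vs-last
-- match would be an artefact).
def Pre_enforce_heading_order (outline : List (List (String × String))) : Prop :=
  ∀ item ∈ outline, (item.map Prod.fst).Nodup ∧ "level" ∈ item.map Prod.fst
instance (outline : List (List (String × String))) : Decidable (Pre_enforce_heading_order outline) := by unfold Pre_enforce_heading_order; infer_instance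

def pvWitness_enforce_heading_order : (List (List (String × String))) :=
  [[("level", "H3"), ("text", "intro")], [("level", "H2")], [("level", "H4")]]

def Spec_enforce_heading_order (outline : List (List (String × String))) (out : List (List (String × String))) : Prop := out = enforce_heading_order_alt outline
instance (outline : List (List (String × String))) (out : List (List (String × String))) : Decidable (Spec_enforce_heading_order outline out) := by unfold Spec_enforce_heading_order; infer_instance

-- ===== CLAIM (what is proved, stated in full; the proofs are below) =====
def Claim_equal_enforce_heading_order : Prop := ∀ (outline : List (List (String × String))), Dom_enforce_heading_order outline → Pre_enforce_heading_order outline → Spec_enforce_heading_order outline (enforce_heading_order outline)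

-- ===== LEMMAS AND PROOFS =====

-- the correspondence between A's two booleans and B's running maximum
def ehoInv (hs : PySem.Dict String Bool) (est : Int) : Prop :=
  (hs.getD "H1" false = false ∧ hs.getD "H2" false = false ∧ est = 0) ∨
  (hs.getD "H1" false = true ∧ hs.getD "H2" false = false ∧ est = 1) ∨
  (hs.getD "H1" false = true ∧ hs.getD "H2" false = true ∧ 2 ≤ est)

-- re-inserting the value a key already has leaves a nodup-key dict's items unchanged
theorem items_insert_same {d : PySem.Dict String String} {k v : String}
    (hnd : d.keys.Nodup) (h : d.get? k = some v) :
    (d.insert k v).items = d.items := by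
  have hmem : (k, v) ∈ d.items := PySem.Dict.mem_items_of_get?_eq_some d h
  have hc : d.contains k = true := by
    rw [PySem.Dict.contains_eq_isSome_get?, h]; rfl
  rw [PySem.Dict.items_insert_of_contains d v hc]
  conv_rhs => rw [← List.map_id d.items]
  apply List.map_congr_left
  intro p hp
  by_cases hk : p.1 = k
  · have : p = (k, v) := by
      have := List.inj_on_of_nodup_map (f := Prod.fst) hnd hp hmem (by simp [hk])
      exact this
    simp [this]
  · simp [hk]

theorem step_char (hs : PySem.Dict String Bool) (est : Int)
    (item : List (String × String))
    (hnd : (item.map Prod.fst).Nodup) (hlv : "level" ∈ item.map Prod.fst)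
    (hinv : ehoInv hs est) :
    ∃ hs' est' e,
      (∀ acc, ehoStep (hs, acc) item = (hs', acc ++ [e])) ∧
      (∀ acc, ehoAltStep (est, acc) item = (est', acc ++ [e])) ∧
      ehoInv hs' est' := by
  obtain ⟨lv, hget⟩ : ∃ v, (PySem.Dict.mk item).get? "level" = some v := by
    cases hv : (PySem.Dict.mk item).get? "level" with
    | some v => exact ⟨v, rfl⟩
    | none =>
      exact absurd hlv (by simpa [PySem.Dict.keys] using
        (PySem.Dict.get?_eq_none_iff_not_mem_keys _ _).mp hv)
  have hndk : (PySem.Dict.mk item).keys.Nodup := by simpa [PySem.Dict.keys] using hnd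
  by_cases h1 : lv = "H1"
  · -- H1: A leaves the item; B rewrites the same value
    subst h1
    have hsame := items_insert_same hndk hget
    rcases hinv with ⟨e1, e2, e3⟩ | ⟨e1, e2, e3⟩ | ⟨e1, e2, e3⟩
    · subst e3
      exact ⟨hs.insert "H1" true, 1, item, fun acc => by simp [ehoStep, hget, e1, e2],
        fun acc => by simp [ehoAltStep, hget, PySem.Dict.get?_mk_cons, PySem.List.pyGetD_ofNat', hsame],
        Or.inr (Or.inl (by simp [PySem.Dict.getD_insert, e2]))⟩
    · subst e3
      exact ⟨hs.insert "H1" true, 1, item, fun acc => by simp [ehoStep, hget, e1, e2],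
        fun acc => by simp [ehoAltStep, hget, PySem.Dict.get?_mk_cons, PySem.List.pyGetD_ofNat', hsame],
        Or.inr (Or.inl (by simp [PySem.Dict.getD_insert, e2]))⟩
    · refine ⟨hs.insert "H1" true, max est 1, item, fun acc => by simp [ehoStep, hget, e1, e2],
        fun acc => by simp [ehoAltStep, hget, PySem.Dict.get?_mk_cons, PySem.List.pyGetD_ofNat', hsame, (by omega : min 1 (est + 1) = 1)],
        Or.inr (Or.inr (by simp [PySem.Dict.getD_insert, e2]; omega))⟩
  · by_cases h2 : lv = "H2"
    · subst h2
      rcases hinv with ⟨e1, e2, e3⟩ | ⟨e1, e2, e3⟩ | ⟨e1, e2, e3⟩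
      · -- H2 before any H1: downgrade to H1
        subst e3
        exact ⟨hs.insert "H1" true, 1, (PySem.Dict.insert (PySem.Dict.mk item) "level" "H1").items,
          fun acc => by simp [ehoStep, hget, e1],
          fun acc => by simp [ehoAltStep, hget, PySem.Dict.get?_mk_cons, PySem.List.pyGetD_ofNat'],
          Or.inr (Or.inl (by simp [PySem.Dict.getD_insert, e2]))⟩
      · -- H2 after H1: kept, H2 becomes seen
        subst e3
        have hsame := items_insert_same hndk hget
        exact ⟨hs.insert "H2" true, 2, item,
          fun acc => by simp [ehoStep, hget, e1],
          fun acc => by simp [ehoAltStep, hget, PySem.Dict.get?_mk_cons, PySem.List.pyGetD_ofNat', hsame],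
          Or.inr (Or.inr (by simp [PySem.Dict.getD_insert, e1]))⟩
      · -- H2 after an H2 is already seen: unchanged
        have hsame := items_insert_same hndk hget
        refine ⟨hs.insert "H2" true, max est 2, item,
          fun acc => by simp [ehoStep, hget, e1],
          fun acc => by simp [ehoAltStep, hget, PySem.Dict.get?_mk_cons, PySem.List.pyGetD_ofNat', hsame, (by omega : min 2 (est + 1) = 2)],
          Or.inr (Or.inr (by simp [PySem.Dict.getD_insert, e1]))⟩
    · by_cases h3 : lv = "H3"
      · subst h3
        rcases hinv with ⟨e1, e2, e3⟩ | ⟨e1, e2, e3⟩ | ⟨e1, e2, e3⟩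
        · subst e3
          exact ⟨hs.insert "H1" true, 1, (PySem.Dict.insert (PySem.Dict.mk item) "level" "H1").items,
            fun acc => by simp [ehoStep, hget, e1, e2],
            fun acc => by simp [ehoAltStep, hget, PySem.Dict.get?_mk_cons, PySem.List.pyGetD_ofNat'],
            Or.inr (Or.inl (by simp [PySem.Dict.getD_insert, e2]))⟩
        · subst e3
          exact ⟨hs.insert "H2" true, 2, (PySem.Dict.insert (PySem.Dict.mk item) "level" "H2").items,
            fun acc => by simp [ehoStep, hget, e1, e2],
            fun acc => by simp [ehoAltStep, hget, PySem.Dict.get?_mk_cons, PySem.List.pyGetD_ofNat'],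
            Or.inr (Or.inr (by simp [PySem.Dict.getD_insert, e1]))⟩
        · -- H3 after an H2: kept
          have hsame := items_insert_same hndk hget
          refine ⟨hs.insert "H3" true, max est 3, item,
            fun acc => by simp [ehoStep, hget, e2],
            fun acc => by simp [ehoAltStep, hget, PySem.Dict.get?_mk_cons, PySem.List.pyGetD_ofNat', hsame, (by omega : min 3 (est + 1) = 3)],
            Or.inr (Or.inr (by simp [PySem.Dict.getD_insert, e1, e2]))⟩
      · -- unknown level: both leave the item and the state (A records an unread key)
        have hnil : (PySem.Dict.mk ([] : List (String × Int))).get? lv = none := by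
          simp [PySem.Dict.get?]
        refine ⟨hs.insert lv true, est, item,
          fun acc => by simp [ehoStep, hget, h2, h3],
          fun acc => by simp [ehoAltStep, hget, PySem.Dict.get?_mk_cons, hnil, Ne.symm h1, Ne.symm h2, Ne.symm h3],
          ?_⟩
        rcases hinv with ⟨e1, e2, e3⟩ | ⟨e1, e2, e3⟩ | ⟨e1, e2, e3⟩
        · exact Or.inl (by simp [PySem.Dict.getD_insert, Ne.symm h1, Ne.symm h2, e1, e2, e3])
        · exact Or.inr (Or.inl (by simp [PySem.Dict.getD_insert, Ne.symm h1, Ne.symm h2, e1, e2, e3]))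
        · exact Or.inr (Or.inr (by simp [PySem.Dict.getD_insert, Ne.symm h1, Ne.symm h2, e1, e2, e3]))

theorem foldl_eq (outline : List (List (String × String)))
    (hs : PySem.Dict String Bool) (est : Int) (acc : List (List (String × String)))
    (hpre : ∀ item ∈ outline, (item.map Prod.fst).Nodup ∧ "level" ∈ item.map Prod.fst)
    (hinv : ehoInv hs est) :
    (outline.foldl ehoStep (hs, acc)).2 = (outline.foldl ehoAltStep (est, acc)).2 := by
  induction outline generalizing hs est acc with
  | nil => rfl
  | cons item rest ih =>
    obtain ⟨hnd, hlv⟩ := hpre item (by simp)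
    obtain ⟨hs', est', e, hA, hB, hinv'⟩ := step_char hs est item hnd hlv hinv
    simp only [List.foldl_cons, hA, hB]
    exact ih hs' est' (acc ++ [e]) (fun i hi => hpre i (by simp [hi])) hinv'

-- ===== VERDICT (by name: the statement is the Claim_ definition above) =====
theorem enforce_heading_order_spec : Claim_equal_enforce_heading_order := by
  intro outline _ hpre
  unfold Spec_enforce_heading_order enforce_heading_order enforce_heading_order_alt
  exact foldl_eq outline (((PySem.Dict.empty).insert "H1" false).insert "H2" false) 0 [] hpre (by left; exact ⟨by decide, by decide, rfl⟩)
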